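-- pv_equiv track=rewrite | github.com/sd4483/AI-Project | simple_chat_apiv1.py | find_response_pronoun
-- ===== SOURCE A (Python) =====
-- def find_response_pronoun(text_tags):
--     response_pronoun = None
--     for word, pos in text_tags:
--         # Disambiguate pronouns
--         if pos == 'PRP' and (word == 'you' or word == 'You'):
--             response_pronoun = 'I'
--         elif pos == 'PRP' and word == 'I':
--             # If the user mentioned themselves, then they will definitely be the pronoun
--             response_pronoun = 'You'
--         elif pos == 'PRP':
--             response_pronoun = word
--
--     return response_pronoun
-- ===== SOURCE B (Python) =====
-- def find_response_pronoun(text_tags):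
--     # Backward early-exit search for the last PRP tag, with a small word mapping.
--     for word, pos in reversed(list(text_tags)):
--         if pos == 'PRP':
--             if word in ('you', 'You'):
--                 return 'I'
--             if word == 'I':
--                 return 'You'
--             return word
--     return None
-- ===== Notes on version B (the rewrite author's own statement) =====
-- stated objective: simpler
-- what changed: Replaces the forward overwrite-every-match accumulator with a reverse scan that returns immediately at the first (i.e. last) PRP tag, mapped through a small you/I table.
import Mathlib
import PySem

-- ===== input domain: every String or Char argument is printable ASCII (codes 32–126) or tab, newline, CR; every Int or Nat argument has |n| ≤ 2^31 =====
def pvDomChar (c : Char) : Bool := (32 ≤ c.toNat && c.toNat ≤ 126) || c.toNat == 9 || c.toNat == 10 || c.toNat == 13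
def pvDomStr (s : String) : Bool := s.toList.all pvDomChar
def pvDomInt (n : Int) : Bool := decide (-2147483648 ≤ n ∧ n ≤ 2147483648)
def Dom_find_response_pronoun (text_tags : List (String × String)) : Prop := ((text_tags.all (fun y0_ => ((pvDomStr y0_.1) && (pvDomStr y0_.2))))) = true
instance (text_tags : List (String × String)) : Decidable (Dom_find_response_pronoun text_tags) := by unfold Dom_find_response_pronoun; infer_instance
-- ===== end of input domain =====

-- B replaces A's forward overwrite-every-match accumulator by a reverse early-exit search (objective: simpler).

-- ===== PORT A =====
def find_response_pronoun (text_tags : List (String × String)) : Option String :=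
  text_tags.foldl (fun response_pronoun wp =>
    if wp.2 = "PRP" ∧ (wp.1 = "you" ∨ wp.1 = "You") then some "I"
    else if wp.2 = "PRP" ∧ wp.1 = "I" then some "You"
    else if wp.2 = "PRP" then some wp.1
    else response_pronoun) none

-- ===== PORT B =====
def pvMapPRP (word : String) : String :=
  if word = "you" ∨ word = "You" then "I"
  else if word = "I" then "You"
  else word

def find_response_pronoun_alt (text_tags : List (String × String)) : Option String :=
  match text_tags.reverse.find? (fun wp => wp.2 == "PRP") with
  | some wp => some (pvMapPRP wp.1)
  | none => none

-- ===== PRECONDITION & SPEC =====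
def Spec_find_response_pronoun (text_tags : List (String × String)) (out : Option String) : Prop := out = find_response_pronoun_alt text_tags
instance (text_tags : List (String × String)) (out : Option String) : Decidable (Spec_find_response_pronoun text_tags out) := by unfold Spec_find_response_pronoun; infer_instance

-- ===== CLAIM (what is proved, stated in full; the proofs are below) =====
def Claim_equal_find_response_pronoun : Prop := ∀ (text_tags : List (String × String)), Dom_find_response_pronoun text_tags → Spec_find_response_pronoun text_tags (find_response_pronoun text_tags)

-- ===== LEMMAS AND PROOFS =====
theorem frp_eq (text_tags : List (String × String)) :
    find_response_pronoun text_tags = find_response_pronoun_alt text_tags := by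
  induction text_tags using List.reverseRecOn with
  | nil => rfl
  | append_singleton xs x ih =>
    simp only [find_response_pronoun, List.foldl_append, List.foldl_cons, List.foldl_nil,
      find_response_pronoun_alt, List.reverse_append, List.reverse_cons, List.reverse_nil,
      List.nil_append, List.cons_append, List.find?_cons]
    by_cases h : x.2 = "PRP"
    · simp only [h, beq_self_eq_true, cond_true, true_and, pvMapPRP]
      by_cases h1 : x.1 = "you" ∨ x.1 = "You"
      · simp [h1]
      · by_cases h2 : x.1 = "I" <;> simp [h1, h2]
    · have hb : (x.2 == "PRP") = false := by simp [h]
      simp only [h, hb, cond_false, false_and, if_false]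
      exact ih

-- ===== VERDICT (by name: the statement is the Claim_ definition above) =====
theorem find_response_pronoun_spec : Claim_equal_find_response_pronoun := by
  intro tt _
  unfold Spec_find_response_pronoun
  exact frp_eq tt
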